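-- pv_equiv track=rewrite | github.com/totoLab/code-ingegneria-informatica | fondamentiDiInformatica1/simulazioni_esame/16012023/3.py | statistiche
-- ===== SOURCE A (Python) =====
-- def statistiche(V, C):
--     d = {}
--     for citta in C:
--         for riga in V:
--             if (riga[1] in C[citta]):
--                 mattina = riga[2]
--                 pom = riga[3]
--                 if citta not in d:
--                     d[citta] = [0, 0]
--                 d[citta][0] += mattina
--                 d[citta][1] += pom
--     return d
-- ===== SOURCE B (Python) =====
-- def statistiche(V, C):
--     # Invert C once: code -> list of cities using that code (no duplicates).
--     idx = {}
--     for citta in C: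
--         for code in C[citta]:
--             cities = idx.setdefault(code, [])
--             if citta not in cities:
--                 cities.append(citta)
--     # One pass over V, accumulating (morning, afternoon) per city.
--     s = {}
--     for riga in V:
--         for citta in idx.get(riga[1], ()):
--             m, p = s.get(citta, (0, 0))
--             s[citta] = (m + riga[2], p + riga[3])
--     # Emit in C's key order, only cities that matched at least one row.
--     return {citta: [s[citta][0], s[citta][1]] for citta in C if citta in s}
-- ===== Notes on version B (the rewrite author's own statement) =====
-- stated objective: alternative
-- what changed: A rescans all of V for every city and tests membership against that city's code list; B inverts C once into a code->cities index, makes a single pass over V accumulating per-city sums via the index, and emits the result in C's key order (intended as faster, but a timing run measured only ~1.4x at the largest size, so no speed is claimed).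
import Mathlib
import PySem

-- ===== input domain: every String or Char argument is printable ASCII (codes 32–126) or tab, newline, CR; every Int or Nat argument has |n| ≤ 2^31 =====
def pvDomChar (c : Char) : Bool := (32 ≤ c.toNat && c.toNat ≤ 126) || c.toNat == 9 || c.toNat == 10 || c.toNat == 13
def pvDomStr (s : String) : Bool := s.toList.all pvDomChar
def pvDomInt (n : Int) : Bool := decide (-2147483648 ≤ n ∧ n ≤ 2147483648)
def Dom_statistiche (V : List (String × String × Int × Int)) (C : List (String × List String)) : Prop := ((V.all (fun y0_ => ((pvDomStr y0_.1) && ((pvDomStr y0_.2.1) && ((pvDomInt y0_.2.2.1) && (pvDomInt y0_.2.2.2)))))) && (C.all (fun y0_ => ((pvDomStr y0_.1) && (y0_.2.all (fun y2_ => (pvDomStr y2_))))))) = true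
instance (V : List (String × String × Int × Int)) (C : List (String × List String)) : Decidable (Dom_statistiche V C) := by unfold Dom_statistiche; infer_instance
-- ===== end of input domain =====

-- B inverts C once into a code->cities index and sums per city in one pass over V
-- instead of A's rescan of V per city; return values proved equal.

-- ===== PORT A =====
-- Literal port of A: for each key of C, rescan all of V; the two in-place
-- increments d[citta][0] += mattina; d[citta][1] += pom are ported as one
-- rebuild of the two-element list (same resulting value).
def statistiche (V : List (String × String × Int × Int)) (C : List (String × List String)) : List (String × List Int) :=
  let cd := PySem.Dict.ofList C
  ((cd.keys).foldl (fun d citta =>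
    V.foldl (fun d riga =>
      if riga.2.1 ∈ cd.getD citta [] then
        let d := if d.contains citta then d else d.insert citta [0, 0]
        match d.getD citta [] with
        | [a, b] => d.insert citta [a + riga.2.2.1, b + riga.2.2.2]
        | _ => d
      else d) d) (PySem.Dict.empty : PySem.Dict String (List Int))).items

-- ===== PORT B =====
-- Literal port of Source B: build the code->cities index (setdefault + in-place
-- append ported as getD/insert, overwrite keeps position), one pass over V
-- updating per-city (morning, afternoon) pairs (s[citta] = pair rebuilt from
-- s.get(citta, (0,0)) is Dict.modify), then the dict comprehension over C's
-- keys, ported as filterMap (its keys are distinct and fresh, in C order).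
def statistiche_alt (V : List (String × String × Int × Int)) (C : List (String × List String)) : List (String × List Int) :=
  let cd := PySem.Dict.ofList C
  let idx := cd.items.foldl (fun idx p =>
      p.2.foldl (fun idx code =>
        let cities := idx.getD code []
        if p.1 ∈ cities then idx else idx.insert code (cities ++ [p.1])) idx)
    (PySem.Dict.empty : PySem.Dict String (List String))
  let s := V.foldl (fun s riga =>
      (idx.getD riga.2.1 []).foldl (fun s citta =>
        s.modify citta (0, 0) (fun q => (q.1 + riga.2.2.1, q.2 + riga.2.2.2))) s)
    (PySem.Dict.empty : PySem.Dict String (Int × Int))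
  cd.keys.filterMap (fun citta =>
    if s.contains citta then
      some (citta, [(s.getD citta (0, 0)).1, (s.getD citta (0, 0)).2])
    else none)

-- ===== PRECONDITION & SPEC =====
def Spec_statistiche (V : List (String × String × Int × Int)) (C : List (String × List String)) (out : List (String × List Int)) : Prop := out = statistiche_alt V C
instance (V : List (String × String × Int × Int)) (C : List (String × List String)) (out : List (String × List Int)) : Decidable (Spec_statistiche V C out) := by unfold Spec_statistiche; infer_instance

-- ===== CLAIM (what is proved, stated in full; the proofs are below) =====
def Claim_equal_statistiche : Prop := ∀ (V : List (String × String × Int × Int)) (C : List (String × List String)), Dom_statistiche V C → Spec_statistiche V C (statistiche V C)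

-- ===== LEMMAS AND PROOFS =====

-- (q.1 + morning, q.2 + afternoon) for one row
def pvApply (r : String × String × Int × Int) (q : Int × Int) : Int × Int :=
  (q.1 + r.2.2.1, q.2 + r.2.2.2)

-- fold the rows of V whose code lies in `codes` onto q
def pvS (codes : List String) (q : Int × Int) (V : List (String × String × Int × Int)) : Int × Int :=
  V.foldl (fun q r => if r.2.1 ∈ codes then pvApply r q else q) q

-- does any row of V match `codes`?
def pvAny (codes : List String) (V : List (String × String × Int × Int)) : Bool :=
  V.any (fun r => decide (r.2.1 ∈ codes))

-- the common value both ports compute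
def pvCanon (V : List (String × String × Int × Int)) (cd : PySem.Dict String (List String)) : List (String × List Int) :=
  cd.keys.filterMap (fun c =>
    if pvAny (cd.getD c []) V then
      some (c, [(pvS (cd.getD c []) (0, 0) V).1, (pvS (cd.getD c []) (0, 0) V).2])
    else none)

-- re-inserting an already present binding with its own value changes nothing
theorem pv_insert_eq_self {ν : Type} (d : PySem.Dict String ν) (c : String) (v : ν)
    (hnd : d.keys.Nodup) (h : d.get? c = some v) : d.insert c v = d := by
  apply PySem.Dict.ext
  have hcont : d.contains c = true := by
    rw [PySem.Dict.contains_eq_isSome_get?, h]; rfl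
  rw [PySem.Dict.items_insert_of_contains _ _ hcont]
  conv_rhs => rw [← List.map_id d.items]
  apply List.map_congr_left
  intro p hp
  by_cases hpc : p.1 = c
  · have hm : (p.1, p.2) ∈ d.items := hp
    have : d.get? p.1 = some p.2 := PySem.Dict.get?_of_mem_items _ hm hnd
    rw [hpc, h] at this
    simp [hpc, Option.some_inj.mp this]
    rw [← hpc]
  · simp [hpc]

-- A's inner loop over V, once citta is already bound to [a, b]
theorem pv_innerA_some (c : String) (codes : List String)
    (V : List (String × String × Int × Int)) :
    ∀ (d : PySem.Dict String (List Int)) (a b : Int), d.keys.Nodup → d.get? c = some [a, b] →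
    V.foldl (fun d riga =>
      if riga.2.1 ∈ codes then
        let d := if d.contains c then d else d.insert c [0, 0]
        match d.getD c [] with
        | [x, y] => d.insert c [x + riga.2.2.1, y + riga.2.2.2]
        | _ => d
      else d) d
    = d.insert c [(pvS codes (a, b) V).1, (pvS codes (a, b) V).2] := by
  induction V with
  | nil =>
    intro d a b hnd h
    simp only [List.foldl_nil, pvS, pvApply]
    exact (pv_insert_eq_self d c [a, b] hnd h).symm
  | cons r V ih =>
    intro d a b hnd h
    have hcont : d.contains c = true := by
      rw [PySem.Dict.contains_eq_isSome_get?, h]; rfl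
    by_cases hm : r.2.1 ∈ codes
    · simp only [List.foldl_cons, hm, if_pos, hcont,
        PySem.Dict.getD_of_get?_eq_some _ _ h]
      rw [ih (d.insert c [a + r.2.2.1, b + r.2.2.2]) (a + r.2.2.1) (b + r.2.2.2)
          (PySem.Dict.nodup_keys_insert _ _ _ hnd) (PySem.Dict.get?_insert_self _ _ _),
        PySem.Dict.insert_insert_self]
      simp [pvS, pvApply, hm]
    · simp only [List.foldl_cons, hm, if_false]
      rw [ih d a b hnd h]
      simp [pvS, pvApply, hm]

-- A's inner loop over V from a dict not containing citta
theorem pv_innerA (c : String) (codes : List String)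
    (V : List (String × String × Int × Int))
    (d : PySem.Dict String (List Int)) (hnd : d.keys.Nodup) (hc : d.contains c = false) :
    V.foldl (fun d riga =>
      if riga.2.1 ∈ codes then
        let d := if d.contains c then d else d.insert c [0, 0]
        match d.getD c [] with
        | [x, y] => d.insert c [x + riga.2.2.1, y + riga.2.2.2]
        | _ => d
      else d) d
    = if pvAny codes V then d.insert c [(pvS codes (0, 0) V).1, (pvS codes (0, 0) V).2] else d := by
  induction V with
  | nil => simp [pvAny]
  | cons r V ih =>
    by_cases hm : r.2.1 ∈ codes
    · simp only [List.foldl_cons, hm, if_pos, hc, Bool.false_eq_true, if_false]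
      have hg : (d.insert c [0, 0]).getD c [] = [0, 0] :=
        PySem.Dict.getD_of_get?_eq_some _ _ (PySem.Dict.get?_insert_self _ _ _)
      rw [hg]
      rw [pv_innerA_some c codes V ((d.insert c [0,0]).insert c [0 + r.2.2.1, 0 + r.2.2.2])
          (0 + r.2.2.1) (0 + r.2.2.2)
          (PySem.Dict.nodup_keys_insert _ _ _ (PySem.Dict.nodup_keys_insert _ _ _ hnd))
          (PySem.Dict.get?_insert_self _ _ _),
        PySem.Dict.insert_insert_self, PySem.Dict.insert_insert_self]
      have : pvAny codes (r :: V) = true := by simp [pvAny, hm]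
      rw [this, if_pos rfl]
      simp [pvS, pvApply, hm]
    · simp only [List.foldl_cons, hm, if_false]
      rw [ih]
      have h1 : pvAny codes (r :: V) = pvAny codes V := by simp [pvAny, hm]
      have h2 : pvS codes (0,0) (r :: V) = pvS codes (0,0) V := by simp [pvS, hm]
      rw [h1, h2]

-- A's outer loop over distinct fresh keys appends one entry per matching city
theorem pv_outerA (cd : PySem.Dict String (List String))
    (V : List (String × String × Int × Int)) :
    ∀ (Ks : List String) (d : PySem.Dict String (List Int)), d.keys.Nodup → Ks.Nodup →
    (∀ c ∈ Ks, d.contains c = false) →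
    (Ks.foldl (fun d citta =>
      V.foldl (fun d riga =>
        if riga.2.1 ∈ cd.getD citta [] then
          let d := if d.contains citta then d else d.insert citta [0, 0]
          match d.getD citta [] with
          | [x, y] => d.insert citta [x + riga.2.2.1, y + riga.2.2.2]
          | _ => d
        else d) d) d).items
    = d.items ++ Ks.filterMap (fun c =>
        if pvAny (cd.getD c []) V then
          some (c, [(pvS (cd.getD c []) (0, 0) V).1, (pvS (cd.getD c []) (0, 0) V).2])
        else none) := by
  intro Ks
  induction Ks with
  | nil => intro d _ _ _; simp
  | cons k Ks ih =>
    intro d hnd hKs hfresh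
    have hk : d.contains k = false := hfresh k (by simp)
    simp only [List.foldl_cons]
    rw [pv_innerA k (cd.getD k []) V d hnd hk]
    by_cases hA : pvAny (cd.getD k []) V
    · rw [if_pos hA]
      rw [ih (d.insert k [(pvS (cd.getD k []) (0,0) V).1, (pvS (cd.getD k []) (0,0) V).2])
          (PySem.Dict.nodup_keys_insert _ _ _ hnd) hKs.of_cons ?fresh]
      · rw [PySem.Dict.items_insert_of_not_contains _ _ hk]
        simp [hA, List.append_assoc]
      case fresh =>
        intro c hc
        rw [PySem.Dict.contains_insert]
        have hne : c ≠ k := by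
          rintro rfl; exact (List.nodup_cons.mp hKs).1 hc
        simp [hne, hfresh c (by simp [hc])]
    · rw [if_neg hA]
      rw [ih d hnd hKs.of_cons (fun c hc => hfresh c (by simp [hc]))]
      simp [hA]

theorem pv_A_eq_canon (V : List (String × String × Int × Int)) (C : List (String × List String)) :
    statistiche V C = pvCanon V (PySem.Dict.ofList C) := by
  unfold statistiche pvCanon
  rw [pv_outerA (PySem.Dict.ofList C) V (PySem.Dict.ofList C).keys PySem.Dict.empty
      (by simp) (PySem.Dict.nodup_keys_ofList C)
      (fun c _ => PySem.Dict.contains_empty c)]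
  rfl

-- B's index: one entry (c0, codes) of C adds c0 to the city list of each of its codes
theorem pv_idx_entry (c0 : String) :
    ∀ (codes : List String) (idx : PySem.Dict String (List String)),
    (∀ code, (idx.getD code []).Nodup) →
    (∀ code, ((codes.foldl (fun idx code =>
        let cities := idx.getD code []
        if c0 ∈ cities then idx else idx.insert code (cities ++ [c0])) idx).getD code []).Nodup)
    ∧ (∀ code c, c ∈ (codes.foldl (fun idx code =>
        let cities := idx.getD code []
        if c0 ∈ cities then idx else idx.insert code (cities ++ [c0])) idx).getD code []
        ↔ c ∈ idx.getD code [] ∨ (c = c0 ∧ code ∈ codes)) := by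
  intro codes
  induction codes with
  | nil => intro idx h; simp [h]
  | cons k codes ih =>
    intro idx h
    simp only [List.foldl_cons]
    by_cases hk : c0 ∈ idx.getD k []
    · simp only [hk, if_pos]
      obtain ⟨h1, h2⟩ := ih idx h
      refine ⟨h1, fun code c => ?_⟩
      rw [h2 code c]
      constructor
      · rintro (hc | ⟨rfl, hc⟩)
        · exact Or.inl hc
        · exact Or.inr ⟨rfl, by simp [hc]⟩
      · rintro (hc | ⟨rfl, hc⟩)
        · exact Or.inl hc
        · rcases List.mem_cons.mp hc with rfl | hc
          · exact Or.inl hk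
          · exact Or.inr ⟨rfl, hc⟩
    · simp only [hk, if_false]
      have hnod : ∀ code, ((idx.insert k (idx.getD k [] ++ [c0])).getD code []).Nodup := by
        intro code
        rw [PySem.Dict.getD_insert]
        split_ifs with hck
        · simp only [List.nodup_append, List.nodup_singleton, true_and]
          refine ⟨h k, ?_⟩
          intro a ha b hb
          have hb' : b = c0 := List.mem_singleton.mp hb
          subst hb'
          intro heq
          exact hk (heq ▸ ha)
        · exact h code
      obtain ⟨h1, h2⟩ := ih _ hnod
      refine ⟨h1, fun code c => ?_⟩
      rw [h2 code c, PySem.Dict.getD_insert]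
      by_cases hck : code = k
      · subst hck
        simp only [if_pos rfl, List.mem_append, List.mem_cons, List.not_mem_nil, or_false,
          List.mem_singleton, eq_self_iff_true, if_true, true_or]
        tauto
      · rw [if_neg hck]
        simp only [List.mem_cons]
        tauto

-- B's index over all of C's items: membership characterisation + nodup lists
theorem pv_idx_build :
    ∀ (ps : List (String × List String)) (idx : PySem.Dict String (List String)),
    (∀ code, (idx.getD code []).Nodup) →
    (∀ code, ((ps.foldl (fun idx p =>
        p.2.foldl (fun idx code =>
          let cities := idx.getD code []
          if p.1 ∈ cities then idx else idx.insert code (cities ++ [p.1])) idx) idx).getD code []).Nodup)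
    ∧ (∀ code c, c ∈ (ps.foldl (fun idx p =>
        p.2.foldl (fun idx code =>
          let cities := idx.getD code []
          if p.1 ∈ cities then idx else idx.insert code (cities ++ [p.1])) idx) idx).getD code []
        ↔ c ∈ idx.getD code [] ∨ ∃ p ∈ ps, c = p.1 ∧ code ∈ p.2) := by
  intro ps
  induction ps with
  | nil => intro idx h; simp [h]
  | cons p ps ih =>
    intro idx h
    simp only [List.foldl_cons]
    obtain ⟨e1, e2⟩ := pv_idx_entry p.1 p.2 idx h
    obtain ⟨h1, h2⟩ := ih _ e1
    refine ⟨h1, fun code c => ?_⟩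
    rw [h2 code c, e2 code c]
    simp only [List.mem_cons]
    constructor
    · rintro ((hc | ⟨rfl, hc⟩) | ⟨q, hq, rfl, hc⟩)
      · exact Or.inl hc
      · exact Or.inr ⟨p, Or.inl rfl, rfl, hc⟩
      · exact Or.inr ⟨q, Or.inr hq, rfl, hc⟩
    · rintro (hc | ⟨q, hq | hq, rfl, hc⟩)
      · exact Or.inl (Or.inl hc)
      · exact Or.inl (Or.inr ⟨by rw [hq], by rw [hq] at hc; exact hc⟩)
      · exact Or.inr ⟨q, hq, rfl, hc⟩

-- B's per-row update loop: each city of the (nodup) list gets one pvApply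
theorem pv_row (r : String × String × Int × Int) :
    ∀ (L : List String) (s : PySem.Dict String (Int × Int)), L.Nodup → ∀ (c : String),
    ((L.foldl (fun s citta =>
        s.modify citta (0, 0) (fun q => (q.1 + r.2.2.1, q.2 + r.2.2.2))) s).getD c (0, 0)
      = if c ∈ L then pvApply r (s.getD c (0, 0)) else s.getD c (0, 0))
    ∧ ((L.foldl (fun s citta =>
        s.modify citta (0, 0) (fun q => (q.1 + r.2.2.1, q.2 + r.2.2.2))) s).contains c
      = (decide (c ∈ L) || s.contains c)) := by
  intro L
  induction L with
  | nil => intro s _ c; simp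
  | cons k L ih =>
    intro s hnd c
    obtain ⟨ih1, ih2⟩ := ih (s.modify k (0,0) (fun q => (q.1 + r.2.2.1, q.2 + r.2.2.2))) hnd.of_cons c
    simp only [List.foldl_cons]
    constructor
    · rw [ih1, PySem.Dict.getD_modify]
      by_cases hck : c = k
      · subst hck
        have hcL : c ∉ L := (List.nodup_cons.mp hnd).1
        simp [hcL, pvApply]
      · simp only [hck, if_false, List.mem_cons]
        by_cases hcL : c ∈ L <;> simp [hck, hcL]
    · rw [ih2, PySem.Dict.contains_modify]
      by_cases hck : c = k
      · subst hck; simp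
      · have hb : (c == k) = false := beq_eq_false_iff_ne.mpr hck
        simp [hb, List.mem_cons, hck]

-- B's accumulation over V: s.getD is pvS, s.contains is pvAny
theorem pv_sfold (idx : PySem.Dict String (List String)) (cd : PySem.Dict String (List String))
    (hmem : ∀ (code c : String), c ∈ idx.getD code [] ↔ code ∈ cd.getD c [])
    (hnodI : ∀ code, (idx.getD code []).Nodup) :
    ∀ (V : List (String × String × Int × Int)) (s : PySem.Dict String (Int × Int)) (c : String),
    ((V.foldl (fun s riga =>
        (idx.getD riga.2.1 []).foldl (fun s citta =>
          s.modify citta (0, 0) (fun q => (q.1 + riga.2.2.1, q.2 + riga.2.2.2))) s) s).getD c (0, 0)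
      = pvS (cd.getD c []) (s.getD c (0, 0)) V)
    ∧ ((V.foldl (fun s riga =>
        (idx.getD riga.2.1 []).foldl (fun s citta =>
          s.modify citta (0, 0) (fun q => (q.1 + riga.2.2.1, q.2 + riga.2.2.2))) s) s).contains c
      = (pvAny (cd.getD c []) V || s.contains c)) := by
  intro V
  induction V with
  | nil => intro s c; simp [pvS, pvAny]
  | cons r V ih =>
    intro s c
    simp only [List.foldl_cons]
    obtain ⟨ih1, ih2⟩ := ih ((idx.getD r.2.1 []).foldl (fun s citta =>
      s.modify citta (0, 0) (fun q => (q.1 + r.2.2.1, q.2 + r.2.2.2))) s) c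
    obtain ⟨row1, row2⟩ := pv_row r (idx.getD r.2.1 []) s (hnodI r.2.1) c
    constructor
    · rw [ih1, row1]
      by_cases hm : r.2.1 ∈ cd.getD c []
      · rw [if_pos ((hmem r.2.1 c).mpr hm)]
        simp [pvS, hm]
      · rw [if_neg (fun hc => hm ((hmem r.2.1 c).mp hc))]
        simp [pvS, hm]
    · rw [ih2, row2]
      by_cases hm : r.2.1 ∈ cd.getD c []
      · have : c ∈ idx.getD r.2.1 [] := (hmem r.2.1 c).mpr hm
        simp [pvAny, hm, this]
      · have : c ∉ idx.getD r.2.1 [] := fun hc => hm ((hmem r.2.1 c).mp hc)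
        simp [pvAny, hm, this, Bool.or_assoc]

theorem pv_B_eq_canon (V : List (String × String × Int × Int)) (C : List (String × List String)) :
    statistiche_alt V C = pvCanon V (PySem.Dict.ofList C) := by
  unfold statistiche_alt pvCanon
  have hnd : (PySem.Dict.ofList C).keys.Nodup := PySem.Dict.nodup_keys_ofList C
  obtain ⟨hnodI, hmemI⟩ := pv_idx_build (PySem.Dict.ofList C).items
    (PySem.Dict.empty : PySem.Dict String (List String)) (by intro code; simp)
  have hmem : ∀ (code c : String),
      c ∈ ((PySem.Dict.ofList C).items.foldl (fun idx p =>
        p.2.foldl (fun idx code =>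
          let cities := idx.getD code []
          if p.1 ∈ cities then idx else idx.insert code (cities ++ [p.1])) idx)
        (PySem.Dict.empty : PySem.Dict String (List String))).getD code []
      ↔ code ∈ (PySem.Dict.ofList C).getD c [] := by
    intro code c
    rw [hmemI code c]
    simp only [PySem.Dict.getD_empty, List.not_mem_nil, false_or]
    constructor
    · rintro ⟨p, hp, rfl, hc⟩
      rw [PySem.Dict.getD_of_mem_items _ (by exact (Prod.mk.eta (p := p)) ▸ hp) hnd]
      exact hc
    · intro hc
      by_cases hk : (PySem.Dict.ofList C).contains c = true
      · refine ⟨(c, (PySem.Dict.ofList C).getD c []), ?_, rfl, hc⟩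
        rw [PySem.Dict.items_eq_map_keys _ hnd []]
        exact List.mem_map.mpr ⟨c, (PySem.Dict.contains_iff_mem_keys _ _).mp hk, rfl⟩
      · rw [PySem.Dict.getD_of_not_contains _ _ (by revert hk; cases h : (PySem.Dict.ofList C).contains c <;> simp)] at hc
        exact absurd hc (List.not_mem_nil)
  apply List.filterMap_congr
  intro c hc
  obtain ⟨s1, s2⟩ := pv_sfold _ (PySem.Dict.ofList C) hmem hnodI V
    (PySem.Dict.empty : PySem.Dict String (Int × Int)) c
  rw [s1, s2]
  simp [PySem.Dict.getD_empty, PySem.Dict.contains_empty]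

-- ===== VERDICT (by name: the statement is the Claim_ definition above) =====
theorem statistiche_spec : Claim_equal_statistiche := by
  intro V C _
  show statistiche V C = statistiche_alt V C
  rw [pv_A_eq_canon, pv_B_eq_canon]
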